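-- pv_equiv track=rewrite | github.com/MiMickyyy/Noroantibody | analyze_nanobody_epitope.py | make_pymol_selection_from_keys
-- ===== SOURCE A (Python) =====
-- from collections import defaultdict
-- from typing import Dict, Iterable, List, Optional, Sequence, Tuple
--
-- ResidueKey = Tuple[str, int, str]  # (chain, resseq, icode)
--
-- def residue_resi_token(key: ResidueKey) -> str:
--     _, resseq, icode = key
--     return f"{resseq}{icode}"
--
-- def make_pymol_selection_from_keys(keys: List[ResidueKey]) -> str:
--     if not keys:
--         return "none"
--     by_chain = defaultdict(list)
--     for key in keys:
--         by_chain[key[0]].append(residue_resi_token(key))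
--     parts = []
--     for chain_id, tokens in sorted(by_chain.items()):
--         uniq_tokens = sorted(set(tokens), key=lambda x: (int("".join(ch for ch in x if ch.isdigit()) or 0), x))
--         parts.append(f"(chain {chain_id} and resi {'+'.join(uniq_tokens)})")
--     return " or ".join(parts)
-- ===== SOURCE B (Python) =====
-- from itertools import groupby
-- from typing import List, Tuple
--
-- ResidueKey = Tuple[str, int, str]
--
-- def residue_resi_token(key: ResidueKey) -> str:
--     _, resseq, icode = key
--     return f"{resseq}{icode}"
--
-- def make_pymol_selection_from_keys(keys: List[ResidueKey]) -> str:
--     if not keys: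
--         return "none"
--     # one deduplicated (chain, token) pair list, one global sort, one grouped pass
--     pairs = list(dict.fromkeys((key[0], residue_resi_token(key)) for key in keys))
--     pairs.sort(key=lambda p: (p[0], int("".join(ch for ch in p[1] if ch.isdigit()) or 0), p[1]))
--     return " or ".join(
--         f"(chain {chain} and resi {'+'.join(t for _, t in grp)})"
--         for chain, grp in groupby(pairs, key=lambda p: p[0])
--     )
-- ===== Notes on version B (the rewrite author's own statement) =====
-- stated objective: alternative
-- what changed: Replaces the per-chain defaultdict buckets followed by a sort of each bucket with one deduplicated (chain, token) pair list, a single global sort under the composite key (chain, numeric-digits, token), and one itertools.groupby pass that emits the per-chain segments.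
import Mathlib
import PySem

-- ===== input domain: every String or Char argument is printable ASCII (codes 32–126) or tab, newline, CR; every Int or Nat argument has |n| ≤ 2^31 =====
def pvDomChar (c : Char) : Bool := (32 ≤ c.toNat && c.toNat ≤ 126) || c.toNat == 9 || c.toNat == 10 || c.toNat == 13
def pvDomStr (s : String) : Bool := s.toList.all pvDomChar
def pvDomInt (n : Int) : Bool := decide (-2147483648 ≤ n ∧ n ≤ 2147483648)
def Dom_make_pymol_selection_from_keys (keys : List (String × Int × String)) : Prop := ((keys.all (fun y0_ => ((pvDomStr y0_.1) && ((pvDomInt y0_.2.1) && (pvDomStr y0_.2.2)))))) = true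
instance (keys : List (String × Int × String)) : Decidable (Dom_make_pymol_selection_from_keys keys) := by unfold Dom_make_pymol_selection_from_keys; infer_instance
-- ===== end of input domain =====

-- B replaces A's per-chain defaultdict buckets (each bucket sorted separately) by one deduplicated
-- (chain, token) pair list, a single global sort under a composite key, and one groupby pass (objective: alternative).


-- ===== PORT A =====
-- helper shared by both Pythons: residue_resi_token(key) = f"{resseq}{icode}"
def residue_resi_token (k : String × Int × String) : String :=
  PySem.Int.toStr k.2.1 ++ k.2.2

-- int("".join(ch for ch in t if ch.isdigit()) or 0)  (the sort-key lambda both Pythons use);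
-- on a nonempty all-digit string PySem.Int.ofChars? is `some`, so `.getD 0` only totalizes the port.
def pvNumKey (t : String) : Int :=
  let ds := t.toList.filter PySem.Chars.isdigit
  if ds.isEmpty then 0 else (PySem.Int.ofChars? ds).getD 0

def make_pymol_selection_from_keys (keys : List (String × Int × String)) : String :=
  if keys = [] then "none" else
    let by_chain : PySem.Dict String (List String) :=
      keys.foldl (fun d k => d.modify k.1 [] (fun ts => ts ++ [residue_resi_token k])) PySem.Dict.empty
    -- sorted(by_chain.items()): Python compares the (chain, tokens) tuples lexicographically
    let parts : List String :=
      (PySem.List.sorted by_chain.items (fun it => toLex (it.1, it.2))).foldl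
        (fun ps it =>
          ps ++ ["(chain " ++ it.1 ++ " and resi " ++
                 PySem.Str.join "+"
                   (PySem.List.sorted (PySem.Set.ofList it.2) (fun t => toLex (pvNumKey t, t))) ++ ")"]) []
    PySem.Str.join " or " parts

-- ===== PORT B =====
-- itertools.groupby over the pair list, keyed by the chain (first component)
def pvGroupby : List (String × String) → List (String × List (String × String))
  | [] => []
  | p :: rest =>
    match pvGroupby rest with
    | [] => [(p.1, [p])]
    | (c, g) :: gs => if p.1 = c then (c, p :: g) :: gs else (p.1, [p]) :: (c, g) :: gs

def make_pymol_selection_from_keys_alt (keys : List (String × Int × String)) : String :=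
  if keys = [] then "none" else
    -- list(dict.fromkeys(...)) = ordered dedup of the (chain, token) pairs
    let pairs := PySem.List.dedup (keys.map (fun k => (k.1, residue_resi_token k)))
    -- one global sort by the composite key (chain, numeric digits, token); tuple order is lexicographic
    let spairs := PySem.List.sorted pairs (fun p => toLex (p.1, toLex (pvNumKey p.2, p.2)))
    PySem.Str.join " or "
      ((pvGroupby spairs).map (fun g =>
        "(chain " ++ g.1 ++ " and resi " ++ PySem.Str.join "+" (g.2.map (fun q => q.2)) ++ ")"))

-- ===== PRECONDITION & SPEC =====
def Spec_make_pymol_selection_from_keys (keys : List (String × Int × String)) (out : String) : Prop := out = make_pymol_selection_from_keys_alt keys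
instance (keys : List (String × Int × String)) (out : String) : Decidable (Spec_make_pymol_selection_from_keys keys out) := by unfold Spec_make_pymol_selection_from_keys; infer_instance

-- ===== CLAIM (what is proved, stated in full; the proofs are below) =====
def Claim_equal_make_pymol_selection_from_keys : Prop := ∀ (keys : List (String × Int × String)), Dom_make_pymol_selection_from_keys keys → Spec_make_pymol_selection_from_keys keys (make_pymol_selection_from_keys keys)

-- ===== LEMMAS AND PROOFS =====

-- proof-side abbreviations (used only by the lemmas below)
def pvPairs (keys : List (String × Int × String)) : List (String × String) :=
  keys.map (fun k => (k.1, residue_resi_token k))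

def pvChains (keys : List (String × Int × String)) : List String :=
  PySem.Set.ofList (keys.map (fun k => k.1))

def pvSChains (keys : List (String × Int × String)) : List String :=
  PySem.List.sorted (pvChains keys) (fun c => c)

def pvToks (keys : List (String × Int × String)) (c : String) : List String :=
  ((pvPairs keys).filter (fun p => p.1 == c)).map (fun p => p.2)

def pvSToks (keys : List (String × Int × String)) (c : String) : List String :=
  PySem.List.sorted (PySem.Set.ofList (pvToks keys c)) (fun t => toLex (pvNumKey t, t))

def pvPart (c : String) (toks : List String) : String :=
  "(chain " ++ c ++ " and resi " ++ PySem.Str.join "+" toks ++ ")"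

-- canonical form both sides reach
theorem pv_A_canon (keys : List (String × Int × String)) (h : keys ≠ []) :
    make_pymol_selection_from_keys keys
      = PySem.Str.join " or " ((pvSChains keys).map (fun c => pvPart c (pvSToks keys c))) := by
  have hfold : keys.foldl
      (fun d k => d.modify k.1 [] (fun ts => ts ++ [residue_resi_token k]))
      (PySem.Dict.empty : PySem.Dict String (List String))
      = (pvPairs keys).foldl (fun d p => d.modify p.1 [] (fun ts => ts ++ [p.2])) PySem.Dict.empty := by
    rw [pvPairs, List.foldl_map]
  have hnodup : ((pvPairs keys).foldl (fun d p => d.modify p.1 [] (fun ts => ts ++ [p.2]))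
      (PySem.Dict.empty : PySem.Dict String (List String))).keys.Nodup :=
    PySem.Dict.nodup_keys_foldl_modify_key (pvPairs keys) (fun p => p.1) []
      (fun _ p => (fun ts => ts ++ [p.2])) PySem.Dict.empty List.nodup_nil
  have hkeys : ((pvPairs keys).foldl (fun d p => d.modify p.1 [] (fun ts => ts ++ [p.2]))
      (PySem.Dict.empty : PySem.Dict String (List String))).keys = pvChains keys := by
    rw [PySem.Dict.keys_foldl_modify_key (pvPairs keys) (fun p => p.1) []
      (fun _ p => (fun ts => ts ++ [p.2])) PySem.Dict.empty]
    rw [show ((pvPairs keys).map (fun p => p.1)) = keys.map (fun k => k.1) by simp [pvPairs]]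
    rfl
  have hgetD : ∀ c, ((pvPairs keys).foldl (fun d p => d.modify p.1 [] (fun ts => ts ++ [p.2]))
      (PySem.Dict.empty : PySem.Dict String (List String))).getD c [] = pvToks keys c := by
    intro c
    rw [PySem.Dict.getD_foldl_modify_append (pvPairs keys) PySem.Dict.empty c]
    rfl
  have hitems : ((pvPairs keys).foldl (fun d p => d.modify p.1 [] (fun ts => ts ++ [p.2]))
      (PySem.Dict.empty : PySem.Dict String (List String))).items
      = (pvChains keys).map (fun c => (c, pvToks keys c)) := by
    rw [PySem.Dict.items_eq_map_keys _ hnodup [], hkeys]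
    exact List.map_congr_left (fun c _ => by rw [hgetD c])
  have hsorted : PySem.List.sorted
      (((pvPairs keys).foldl (fun d p => d.modify p.1 [] (fun ts => ts ++ [p.2]))
        (PySem.Dict.empty : PySem.Dict String (List String))).items) (fun it => toLex (it.1, it.2))
      = (pvSChains keys).map (fun c => (c, pvToks keys c)) := by
    apply PySem.List.sorted_eq_of_perm_of_pairwise_lt
    · rw [hitems]
      exact (PySem.List.sorted_perm (pvChains keys) (fun c => c) false).map _
    · rw [pvSChains, List.pairwise_map]
      refine (PySem.List.sorted_ofList_pairwise_lt (keys.map (fun k => k.1))).imp ?_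
      intro a b hab
      exact Prod.Lex.toLex_lt_toLex.mpr (Or.inl hab)
  unfold make_pymol_selection_from_keys
  rw [if_neg h]
  show PySem.Str.join " or " _ = _
  rw [hfold, hsorted, PySem.List.foldl_append_singleton_eq_map, List.nil_append, List.map_map]
  rfl

-- pvGroupby peels one leading block of equal-chain pairs
theorem pv_groupby_block (c : String) (l : List (String × String))
    (hhead : ∀ c' g' gs', pvGroupby l = (c', g') :: gs' → c' ≠ c) :
    ∀ ts : List String, ts ≠ [] →
      pvGroupby (ts.map (Prod.mk c) ++ l) = (c, ts.map (Prod.mk c)) :: pvGroupby l := by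
  intro ts
  induction ts with
  | nil => intro h; exact absurd rfl h
  | cons t ts ih =>
    intro _
    cases ts with
    | nil =>
      simp only [List.map_cons, List.map_nil, List.singleton_append]
      rw [pvGroupby]
      cases hg : pvGroupby l with
      | nil => rfl
      | cons g gs =>
        obtain ⟨c', g'⟩ := g
        dsimp only
        rw [if_neg (fun he => hhead c' g' gs hg he.symm)]
    | cons t' ts' =>
      have ihr := ih (by simp)
      simp only [List.map_cons, List.cons_append] at ihr ⊢
      rw [pvGroupby, ihr]
      dsimp only
      rw [if_pos rfl]

-- groupby of a flatMap of nonempty per-chain blocks with pairwise-distinct chains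
theorem pv_groupby_flatMap (g : String → List String) :
    ∀ (L : List String), L.Pairwise (· ≠ ·) → (∀ c ∈ L, g c ≠ []) →
    pvGroupby (L.flatMap (fun c => (g c).map (Prod.mk c)))
      = L.map (fun c => (c, (g c).map (Prod.mk c))) := by
  intro L
  induction L with
  | nil => intro _ _; rfl
  | cons c L ih =>
    intro hpw hne
    have hpw' := List.pairwise_cons.mp hpw
    have ihr := ih hpw'.2 (fun c' hc' => hne c' (List.mem_cons_of_mem c hc'))
    rw [List.flatMap_cons]
    rw [pv_groupby_block c _ ?hd (g c) (hne c List.mem_cons_self), ihr, List.map_cons]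
    case hd =>
      intro c' g' gs' hg hc'
      rw [ihr] at hg
      cases L with
      | nil => simp at hg
      | cons c0 L0 =>
        have hcc : c0 = c' := by simpa using congrArg (fun l => (l.head?.map Prod.fst)) hg
        exact hpw'.1 c0 List.mem_cons_self ((hcc.trans hc').symm)

theorem pv_spairs (keys : List (String × Int × String)) :
    PySem.List.sorted (PySem.List.dedup (pvPairs keys))
        (fun p => toLex (p.1, toLex (pvNumKey p.2, p.2)))
      = (pvSChains keys).flatMap (fun c => (pvSToks keys c).map (Prod.mk c)) := by
  have hchains : (pvSChains keys).Pairwise (· < ·) :=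
    PySem.List.sorted_ofList_pairwise_lt (keys.map (fun k => k.1))
  have hpw : ((pvSChains keys).flatMap (fun c => (pvSToks keys c).map (Prod.mk c))).Pairwise
      (fun p q => (toLex (p.1, toLex (pvNumKey p.2, p.2)) : String ×ₗ (Int ×ₗ String))
                  < toLex (q.1, toLex (pvNumKey q.2, q.2))) := by
    rw [List.pairwise_flatMap]
    constructor
    · intro c _
      rw [List.pairwise_map]
      have hle := PySem.List.sorted_pairwise (PySem.Set.ofList (pvToks keys c))
        (fun t => toLex (pvNumKey t, t))
      have hnd : (pvSToks keys c).Nodup :=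
        ((PySem.List.sorted_perm (PySem.Set.ofList (pvToks keys c))
            (fun t => toLex (pvNumKey t, t)) false).nodup_iff).mpr
          (PySem.Set.nodup_ofList (pvToks keys c))
      refine (hle.and hnd).imp ?_
      intro t u ⟨hle', hne'⟩
      have hlt : (toLex (pvNumKey t, t) : Int ×ₗ String) < toLex (pvNumKey u, u) := by
        refine lt_of_le_of_ne hle' (fun he => hne' ?_)
        have := toLex_inj.mp he
        exact congrArg Prod.snd this
      exact Prod.Lex.toLex_lt_toLex.mpr (Or.inr ⟨rfl, hlt⟩)
    · refine hchains.imp ?_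
      intro c c' hlt x hx y hy
      obtain ⟨t, _, rfl⟩ := List.mem_map.mp hx
      obtain ⟨u, _, rfl⟩ := List.mem_map.mp hy
      exact Prod.Lex.toLex_lt_toLex.mpr (Or.inl hlt)
  apply PySem.List.sorted_eq_of_perm_of_pairwise_lt _ _ _ ?perm hpw
  case perm =>
    have hnd₁ : ((pvSChains keys).flatMap (fun c => (pvSToks keys c).map (Prod.mk c))).Nodup :=
      hpw.imp (fun hlt he => absurd (he ▸ hlt) (lt_irrefl _))
    rw [List.perm_ext_iff_of_nodup hnd₁ (PySem.List.nodup_dedup (pvPairs keys))]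
    intro p
    rw [PySem.List.mem_dedup, List.mem_flatMap]
    constructor
    · rintro ⟨c, _, hp⟩
      obtain ⟨t, ht, rfl⟩ := List.mem_map.mp hp
      have ht' : t ∈ pvToks keys c := by
        have h1 := (PySem.List.mem_sorted _ _ _ t).mp ht
        exact (PySem.Set.mem_ofList _ t).mp h1
      obtain ⟨q, hq, rfl⟩ := List.mem_map.mp ht'
      have hq1 : q.1 = c := by simpa using (List.mem_filter.mp hq).2
      have hql := (List.mem_filter.mp hq).1
      rw [← hq1]
      simpa using hql
    · intro hp
      refine ⟨p.1, ?_, ?_⟩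
      · rw [pvSChains, PySem.List.mem_sorted, pvChains, PySem.Set.mem_ofList]
        obtain ⟨k, hk, rfl⟩ := List.mem_map.mp hp
        exact List.mem_map.mpr ⟨k, hk, rfl⟩
      · refine List.mem_map.mpr ⟨p.2, ?_, rfl⟩
        rw [pvSToks, PySem.List.mem_sorted, PySem.Set.mem_ofList, pvToks]
        exact List.mem_map.mpr ⟨p, List.mem_filter.mpr ⟨hp, by simp⟩, rfl⟩

theorem pv_B_canon (keys : List (String × Int × String)) (h : keys ≠ []) :
    make_pymol_selection_from_keys_alt keys
      = PySem.Str.join " or " ((pvSChains keys).map (fun c => pvPart c (pvSToks keys c))) := by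
  unfold make_pymol_selection_from_keys_alt
  rw [if_neg h]
  have hsp := pv_spairs keys
  show PySem.Str.join " or " _ = _
  rw [show (keys.map (fun k => (k.1, residue_resi_token k))) = pvPairs keys from rfl, hsp]
  rw [pv_groupby_flatMap (fun c => pvSToks keys c) (pvSChains keys) ?nd ?ne]
  case nd =>
    exact (PySem.List.sorted_ofList_pairwise_lt (keys.map (fun k => k.1))).imp (fun hab => ne_of_lt hab)
  case ne =>
    intro c hc
    have hc' : c ∈ keys.map (fun k => k.1) := by
      have h1 := (PySem.List.mem_sorted _ _ _ c).mp hc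
      exact (PySem.Set.mem_ofList _ c).mp h1
    obtain ⟨k, hk, rfl⟩ := List.mem_map.mp hc'
    intro hnil
    unfold pvSToks at hnil
    rw [PySem.List.sorted_eq_nil_iff] at hnil
    have hmem : residue_resi_token k ∈ PySem.Set.ofList (pvToks keys k.1) := by
      rw [PySem.Set.mem_ofList]
      unfold pvToks pvPairs
      simp only [List.mem_map, List.mem_filter]
      exact ⟨(k.1, residue_resi_token k), ⟨⟨k, hk, rfl⟩, by simp⟩, rfl⟩
    rw [hnil] at hmem
    exact absurd hmem List.not_mem_nil
  rw [List.map_map]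
  exact congrArg (PySem.Str.join " or ")
    (List.map_congr_left (fun c _ => by simp [pvPart, List.map_map, Function.comp]))

-- ===== VERDICT (by name: the statement is the Claim_ definition above) =====
theorem make_pymol_selection_from_keys_spec : Claim_equal_make_pymol_selection_from_keys := by
  intro keys _
  unfold Spec_make_pymol_selection_from_keys
  by_cases h : keys = []
  · subst h; rfl
  · rw [pv_A_canon keys h, pv_B_canon keys h]
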